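-- pv_equiv track=rewrite | github.com/leilei37/scripts | grepcol3.py | grep_and_rename_columns
-- ===== SOURCE A (Python) =====
-- def grep_and_rename_columns(data_lines, rename_lines):
--     # Create a dictionary to store the rename mappings from the rename file
--     rename_dict = {}
--     for line in rename_lines:
--         old_column, new_column = line.strip().split()
--         rename_dict[old_column] = new_column
--
--     # Extract the specific columns from the data
--     header_line = data_lines[0].split()
--     data_lines = data_lines[1:]  # Remove the first line (header) from the data
--     grep_column_indexes = [i for i in range(len(header_line)) if header_line[i] in rename_dict]
--
--     # Process the data and update the column names
--     updated_header_line = []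
--     for col in header_line:
--         if col in rename_dict:
--             updated_header_line.append(rename_dict[col])
--     output_lines = [' '.join(updated_header_line) + '\n']  # Include the updated header line in the output
--
--     for line in data_lines:
--         values = line.split()
--         output_line_values = [values[i] for i in grep_column_indexes]
--         output_line = ' '.join(output_line_values) + '\n'
--         output_lines.append(output_line)
--
--     return output_lines
-- ===== SOURCE B (Python) =====
-- def grep_and_rename_columns(data_lines, rename_lines):
--     # Column-major strategy: pull out each kept column as a whole list, then
--     # stitch the output rows back together from the columns.
--     rename_dict = dict(line.strip().split() for line in rename_lines)
--     header, *rows = [line.split() for line in data_lines]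
--     new_names = []
--     columns = []
--     for j, name in enumerate(header):
--         if name in rename_dict:
--             new_names.append(rename_dict[name])
--             columns.append([row[j] for row in rows])
--     out = [' '.join(new_names) + '\n']
--     for r in range(len(rows)):
--         out.append(' '.join(col[r] for col in columns) + '\n')
--     return out
-- ===== Notes on version B (the rewrite author's own statement) =====
-- stated objective: alternative
-- what changed: B works column-major instead of A's row-major pass: it extracts each kept column as a whole list (one list per selected header) and then reassembles the output rows by index across the column lists, instead of A's precomputed index table applied row by row.
import Mathlib
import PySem

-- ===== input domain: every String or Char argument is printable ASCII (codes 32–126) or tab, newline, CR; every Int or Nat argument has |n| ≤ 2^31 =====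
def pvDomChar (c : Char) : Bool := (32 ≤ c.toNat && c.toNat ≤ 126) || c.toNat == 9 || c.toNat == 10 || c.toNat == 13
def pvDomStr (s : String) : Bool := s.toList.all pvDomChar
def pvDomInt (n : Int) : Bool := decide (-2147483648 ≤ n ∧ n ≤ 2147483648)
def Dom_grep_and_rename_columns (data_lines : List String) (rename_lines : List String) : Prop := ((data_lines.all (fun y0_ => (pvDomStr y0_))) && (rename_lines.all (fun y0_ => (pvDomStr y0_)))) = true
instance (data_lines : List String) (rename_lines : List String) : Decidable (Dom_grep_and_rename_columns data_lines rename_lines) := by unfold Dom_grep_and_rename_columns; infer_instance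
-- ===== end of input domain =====

-- B is column-major where A is row-major: it extracts each kept column whole and stitches the
-- output rows back together from the column lists (same output; proved equal wherever A returns).

-- ===== PORT A =====
-- the rename-mapping construction; both Pythons build exactly this dict (A by an explicit loop,
-- B by dict(line.strip().split() for line in rename_lines))
def pvRenameDict (rename_lines : List String) : PySem.Dict String String :=
  rename_lines.foldl (fun d line =>
    match PySem.Str.split₀ (PySem.Str.strip line) with
    | [old_column, new_column] => d.insert old_column new_column
    | _ => d) PySem.Dict.empty          -- `_` branch: Python raises ValueError; outside Pre_

def grep_and_rename_columns (data_lines : List String) (rename_lines : List String) : List String :=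
  let rename_dict := pvRenameDict rename_lines
  let header_line := PySem.Str.split₀ (PySem.List.pyGetD data_lines 0 "")  -- default: IndexError, outside Pre_
  let rest := PySem.List.slice data_lines (some 1) none
  let grep_column_indexes :=
    (PySem.List.pyRange 0 (header_line.length : Int) 1).filter
      (fun i => rename_dict.contains (PySem.List.pyGetD header_line i ""))
  let updated_header_line :=
    header_line.foldl (fun acc col =>
      if rename_dict.contains col then acc ++ [rename_dict.getD col ""] else acc) []
  rest.foldl (fun output_lines line =>
      let values := PySem.Str.split₀ line
      let output_line_values :=
        grep_column_indexes.map (fun i => PySem.List.pyGetD values i "")  -- default: IndexError, outside Pre_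
      output_lines ++ [PySem.Str.join " " output_line_values ++ "\n"])
    [PySem.Str.join " " updated_header_line ++ "\n"]

-- ===== PORT B =====
def grep_and_rename_columns_alt (data_lines : List String) (rename_lines : List String) : List String :=
  let rename_dict := pvRenameDict rename_lines
  match data_lines.map PySem.Str.split₀ with
  | [] => []                              -- Python raises ValueError (unpacking); outside Pre_
  | header :: rows =>
    -- for j, name in enumerate(header): if name in rename_dict: collect new name + whole column
    let nc := (PySem.List.enumerate header).foldl
      (fun (acc : List String × List (List String)) p =>
        if rename_dict.contains p.2 then
          (acc.1 ++ [rename_dict.getD p.2 ""],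
           acc.2 ++ [rows.map (fun row => PySem.List.pyGetD row p.1 "")])  -- default: IndexError, outside Pre_
        else acc) ([], [])
    -- for r in range(len(rows)): stitch row r back together from the columns
    (PySem.List.pyRange 0 (rows.length : Int) 1).foldl
      (fun out r =>
        out ++ [PySem.Str.join " " (nc.2.map (fun col => PySem.List.pyGetD col r "")) ++ "\n"])
      [PySem.Str.join " " nc.1 ++ "\n"]

-- ===== PRECONDITION & SPEC =====
def pvHeader (data_lines : List String) : List String :=
  PySem.Str.split₀ (data_lines.headD "")
def pvKeys (rename_lines : List String) : List String :=
  rename_lines.map (fun l => (PySem.Str.split₀ (PySem.Str.strip l)).headD "")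
-- Pre_ is exactly where the Python A returns: data_lines nonempty (else IndexError), every
-- rename line splits into exactly two tokens (else ValueError), and in every data row each
-- selected column index is in range (else IndexError).
def Pre_grep_and_rename_columns (data_lines : List String) (rename_lines : List String) : Prop :=
  data_lines ≠ [] ∧
  (∀ l ∈ rename_lines, (PySem.Str.split₀ (PySem.Str.strip l)).length = 2) ∧
  (∀ l ∈ data_lines.tail, ∀ i, i < (pvHeader data_lines).length →
      (pvHeader data_lines).getD i "" ∈ pvKeys rename_lines →
      i < (PySem.Str.split₀ l).length)
instance (data_lines : List String) (rename_lines : List String) : Decidable (Pre_grep_and_rename_columns data_lines rename_lines) := by unfold Pre_grep_and_rename_columns; infer_instance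
def pvWitness_grep_and_rename_columns : List String × List String :=
  (["id name age", "1 ann 7", "2 bob 8"], ["id key", "age years"])
def Spec_grep_and_rename_columns (data_lines : List String) (rename_lines : List String) (out : List String) : Prop := out = grep_and_rename_columns_alt data_lines rename_lines
instance (data_lines : List String) (rename_lines : List String) (out : List String) : Decidable (Spec_grep_and_rename_columns data_lines rename_lines out) := by unfold Spec_grep_and_rename_columns; infer_instance

-- ===== CLAIM (what is proved, stated in full; the proofs are below) =====
def Claim_equal_grep_and_rename_columns : Prop := ∀ (data_lines : List String) (rename_lines : List String), Dom_grep_and_rename_columns data_lines rename_lines → Pre_grep_and_rename_columns data_lines rename_lines → Spec_grep_and_rename_columns data_lines rename_lines (grep_and_rename_columns data_lines rename_lines)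

-- ===== LEMMAS AND PROOFS =====

-- B's enumerate loop, unrolled: it collects both components of the pair accumulator
theorem pv_pair_foldl (L : List (Int × String)) (q : Int × String → Bool)
    (g : Int × String → String) (G : Int × String → List String)
    (acc : List String × List (List String)) :
    L.foldl (fun acc p => if q p then (acc.1 ++ [g p], acc.2 ++ [G p]) else acc) acc
      = (acc.1 ++ (L.filter q).map g, acc.2 ++ (L.filter q).map G) := by
  induction L generalizing acc with
  | nil => simp
  | cons h t ih =>
    rw [List.foldl_cons, List.filter_cons]
    cases hq : q h <;> simp [ih]

-- filtering enumerate on the element and projecting the element = filtering the list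
theorem pv_enum_filter_map_snd (xs : List String) (s : Int) (q : String → Bool)
    (g : String → String) :
    (((PySem.List.enumerate xs s).filter (fun p => q p.2)).map (fun p => g p.2))
      = (xs.filter q).map g := by
  induction xs generalizing s with
  | nil => simp [PySem.List.enumerate_nil]
  | cons x t ih =>
    rw [PySem.List.enumerate_cons, List.filter_cons, List.filter_cons]
    cases hq : q x <;> simp [ih]

-- getD into a mapped list at an in-range index
theorem pv_getD_map {α β : Type} (f : α → β) (l : List α) (k : Nat) (hk : k < l.length) (d : β) :
    (l.map f).getD k d = f l[k] := by
  rw [List.getD_eq_getElem?_getD, List.getElem?_map,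
    List.getElem?_eq_getElem hk]
  rfl

-- ===== VERDICT (by name: the statement is the Claim_ definition above) =====
set_option maxHeartbeats 800000 in
theorem grep_and_rename_columns_spec : Claim_equal_grep_and_rename_columns := by
  intro data_lines rename_lines _ hpre
  obtain ⟨hne, -, -⟩ := hpre
  unfold Spec_grep_and_rename_columns
  cases data_lines with
  | nil => exact absurd rfl hne
  | cons d0 rest =>
    unfold grep_and_rename_columns grep_and_rename_columns_alt
    simp only [List.map_cons]
    rw [show PySem.List.pyGetD (d0 :: rest) 0 "" = d0 from PySem.List.pyGetD_zero_cons d0 rest "",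
      PySem.List.slice_from (d0 :: rest) (by norm_num : (0:Int) ≤ 1)]
    simp only [Int.toNat_one, List.drop_one, List.tail_cons]
    set D := pvRenameDict rename_lines with hD
    set hdr := PySem.Str.split₀ d0 with hhdr
    set gidx := (PySem.List.pyRange 0 (hdr.length : Int) 1).filter
      (fun i => D.contains (PySem.List.pyGetD hdr i "")) with hgidx
    -- A's two loops
    rw [PySem.List.foldl_append_if (fun col => D.contains col) (fun col => D.getD col "") hdr [],
      PySem.List.foldl_append_singleton_eq_map]
    simp only [List.nil_append]
    -- B's pair loop and row loop
    rw [pv_pair_foldl (PySem.List.enumerate hdr) (fun p => D.contains p.2)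
        (fun p => D.getD p.2 "")
        (fun p => (rest.map PySem.Str.split₀).map (fun row => PySem.List.pyGetD row p.1 "")),
      PySem.List.foldl_append_singleton_eq_map]
    simp only [List.nil_append]
    -- the filtered enumerate, as gidx paired with the header entries
    have hK : (PySem.List.enumerate hdr 0).filter (fun p => D.contains p.2)
        = gidx.map (fun j => (j, PySem.List.pyGetD hdr j "")) := by
      rw [PySem.List.enumerate_eq_map_pyRange (d := ""), List.filter_map, hgidx]
      rfl
    refine congrArg₂ (· ++ ·) ?_ ?_
    · -- header line
      rw [pv_enum_filter_map_snd hdr 0 (fun x => D.contains x) (fun x => D.getD x "")]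
    · -- data rows: column-major reassembly = row-major projection
      rw [PySem.List.pyRange_zero_nat, List.map_map]
      apply List.ext_getElem (by simp)
      intro k hk1 hk2
      have hk : k < rest.length := by simpa using hk2
      simp only [List.getElem_map, List.getElem_range, Function.comp]
      refine congrArg₂ (· ++ ·) (congrArg (PySem.Str.join " ") ?_) rfl
      rw [hK, List.map_map, List.map_map]
      apply List.map_congr_left
      intro j _
      simp only [Function.comp, PySem.List.pyGetD_natCast]
      rw [pv_getD_map _ _ k (by simpa using hk), List.getElem_map]
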